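-- pv_equiv track=rewrite | github.com/binhe-lab/C031-Cg-OSR-regulon | 01-gene-expression/analysis/Alignment_Code_2e.py | skn7_Test
-- ===== SOURCE A (Python) =====
-- def skn7_Test(promoter):
--     motif = 'G_C__GGCC'
--     motif2 = 'G_C__GCCC'
--     for i in range(len(promoter)-len(motif)+1):
--         sample = promoter[i:i+len(motif)].upper()
--         if ((motif[0]==sample[0]) and (motif[2] == sample[2]) and
--             ((motif[5:8]==sample[5:8]) or (motif2[5:8] == sample[5:8]))):
--             return True
--     return False
-- ===== SOURCE B (Python) =====
-- def skn7_Test(promoter):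
--     # Staged set-intersection: collect the index sets of G and C once, then
--     # intersect shifted copies so only positions satisfying every constrained
--     # offset (0='G', 2='C', 5='G', 6 in {G,C}, 7='C') of a full 9-char window survive.
--     p = promoter.upper()
--     n = len(p)
--     G = {i for i, ch in enumerate(p) if ch == 'G'}
--     C = {i for i, ch in enumerate(p) if ch == 'C'}
--     cand = {i for i in G if i <= n - 9}
--     cand &= {i - 2 for i in C}
--     cand &= {i - 5 for i in G}
--     cand &= {i - 6 for i in G | C}
--     cand &= {i - 7 for i in C}
--     return len(cand) > 0
-- ===== Notes on version B (the rewrite author's own statement) =====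
-- stated objective: alternative
-- what changed: The sliding-window loop that slices out and uppercases each 9-char window and compares slices against two motif strings is replaced by staged set passes: build the index sets of 'G' and 'C' once from the uppercased string, then intersect shifted copies of them so exactly the window starts satisfying every constrained offset (0='G', 2='C', 5='G', 6 in {G,C}, 7='C') of a full 9-char window survive; the answer is whether the final set is nonempty.
import Mathlib
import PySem

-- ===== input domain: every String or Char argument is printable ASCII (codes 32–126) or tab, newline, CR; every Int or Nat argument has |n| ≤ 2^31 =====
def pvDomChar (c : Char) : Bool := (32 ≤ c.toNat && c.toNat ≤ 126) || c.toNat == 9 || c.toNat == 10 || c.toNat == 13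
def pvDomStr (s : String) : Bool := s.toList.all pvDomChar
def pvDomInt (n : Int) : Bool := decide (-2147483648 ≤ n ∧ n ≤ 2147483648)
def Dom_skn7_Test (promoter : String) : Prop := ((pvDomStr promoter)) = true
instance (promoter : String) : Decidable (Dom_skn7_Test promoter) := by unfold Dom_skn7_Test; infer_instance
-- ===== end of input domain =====

-- B replaces A's sliding-window loop (slice + upper + slice comparisons per position) by
-- staged set passes: collect the index sets of 'G' and 'C' once, then intersect shifted
-- copies of them so only window starts satisfying every constrained offset survive
-- (alternative algorithm, similar cost).

-- ===== PORT A =====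
-- the loop 'for i in range(len(promoter)-len(motif)+1): … return True / return False'
def skn7Loop (promoter motif motif2 : String) : List Int → Bool
  | [] => false
  | i :: rest =>
    let sample := PySem.Str.upper (PySem.Str.slice promoter (some i) (some (i + PySem.Str.len motif)))
    if PySem.Str.pyGet? motif 0 = PySem.Str.pyGet? sample 0 ∧
       PySem.Str.pyGet? motif 2 = PySem.Str.pyGet? sample 2 ∧
       (PySem.Str.slice motif (some 5) (some 8) = PySem.Str.slice sample (some 5) (some 8) ∨
        PySem.Str.slice motif2 (some 5) (some 8) = PySem.Str.slice sample (some 5) (some 8))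
    then true else skn7Loop promoter motif motif2 rest

def skn7_Test (promoter : String) : Bool :=
  let motif := "G_C__GGCC"
  let motif2 := "G_C__GCCC"
  skn7Loop promoter motif motif2
    (PySem.List.pyRange 0 (PySem.Str.len promoter - PySem.Str.len motif + 1))

-- ===== PORT B =====
-- Source B: p = promoter.upper(); G/C = index sets; cand = shifted-set intersections; len(cand) > 0
def skn7_Test_alt (promoter : String) : Bool :=
  let p := PySem.Str.upper promoter
  let n := PySem.Str.len p
  let G : PySem.Set Int := PySem.Set.ofList
    ((PySem.List.enumerate p.toList).filterMap (fun x => if x.2 == 'G' then some x.1 else none))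
  let C : PySem.Set Int := PySem.Set.ofList
    ((PySem.List.enumerate p.toList).filterMap (fun x => if x.2 == 'C' then some x.1 else none))
  let cand0 : PySem.Set Int := PySem.Set.ofList (G.filter (fun i => decide (i ≤ n - 9)))
  let cand1 := PySem.Set.inter cand0 (PySem.Set.ofList (C.map (fun i => i - 2)))
  let cand2 := PySem.Set.inter cand1 (PySem.Set.ofList (G.map (fun i => i - 5)))
  let cand3 := PySem.Set.inter cand2 (PySem.Set.ofList ((PySem.Set.union G C).map (fun i => i - 6)))
  let cand4 := PySem.Set.inter cand3 (PySem.Set.ofList (C.map (fun i => i - 7)))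
  decide (0 < PySem.Set.len cand4)

-- ===== PRECONDITION & SPEC =====
def Spec_skn7_Test (promoter : String) (out : Bool) : Prop := out = skn7_Test_alt promoter
instance (promoter : String) (out : Bool) : Decidable (Spec_skn7_Test promoter out) := by unfold Spec_skn7_Test; infer_instance

-- ===== CLAIM (what is proved, stated in full; the proofs are below) =====
def Claim_equal_skn7_Test : Prop := ∀ (promoter : String), Dom_skn7_Test promoter → Spec_skn7_Test promoter (skn7_Test promoter)

-- ===== LEMMAS AND PROOFS =====

-- common characterization: the uppercased character list has a full 9-char window at k
-- matching the constrained positions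
def SpecP (u : List Char) : Prop :=
  ∃ k : Nat, k + 9 ≤ u.length ∧ u.getD k ' ' = 'G' ∧ u.getD (k+2) ' ' = 'C' ∧
    u.getD (k+5) ' ' = 'G' ∧ (u.getD (k+6) ' ' = 'G' ∨ u.getD (k+6) ' ' = 'C') ∧
    u.getD (k+7) ' ' = 'C'

-- A-side intermediate form (zip-of-shifts over the uppercased list)
def bAny (v : List Char) : Bool :=
  (v.zip ((v.drop 2).zip ((v.drop 5).zip ((v.drop 6).zip ((v.drop 7).zip (v.drop 8)))))).any
    (fun x => x.1 == 'G' && x.2.1 == 'C' && x.2.2.1 == 'G' && (x.2.2.2.1 == 'G' || x.2.2.2.1 == 'C') && x.2.2.2.2.1 == 'C')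

lemma bAny_short (v : List Char) (h : v.length ≤ 8) : bAny v = false := by
  have h8 : v.drop 8 = [] := List.drop_eq_nil_iff.mpr h
  simp [bAny, h8]

lemma bAny_cons (c0 c1 c2 c3 c4 c5 c6 c7 c8 : Char) (t : List Char) :
    bAny (c0::c1::c2::c3::c4::c5::c6::c7::c8::t)
      = (((c0 == 'G') && (c2 == 'C') && (c5 == 'G') && ((c6 == 'G') || (c6 == 'C')) && (c7 == 'C'))
        || bAny (c1::c2::c3::c4::c5::c6::c7::c8::t)) := by
  simp [bAny, Bool.and_assoc]

lemma exists_nine (v : List Char) (h : 9 ≤ v.length) :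
    ∃ c0 c1 c2 c3 c4 c5 c6 c7 c8 t, v = c0::c1::c2::c3::c4::c5::c6::c7::c8::t := by
  match v, h with
  | c0::c1::c2::c3::c4::c5::c6::c7::c8::t, _ => exact ⟨c0,c1,c2,c3,c4,c5,c6,c7,c8,t,rfl⟩

lemma specP_short (u : List Char) (h : u.length ≤ 8) : ¬ SpecP u := by
  rintro ⟨k, hk, -⟩; omega

lemma getD_cons_add_one (c : Char) (w : List Char) (k j : Nat) :
    (c :: w).getD (k + 1 + j) ' ' = w.getD (k + j) ' ' := by
  have : k + 1 + j = (k + j) + 1 := by omega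
  rw [this, List.getD_cons_succ]

lemma specP_cons (c : Char) (w : List Char) :
    SpecP (c :: w) ↔
      ((c :: w).length ≥ 9 ∧ (c :: w).getD 0 ' ' = 'G' ∧ (c :: w).getD 2 ' ' = 'C' ∧
        (c :: w).getD 5 ' ' = 'G' ∧ ((c :: w).getD 6 ' ' = 'G' ∨ (c :: w).getD 6 ' ' = 'C') ∧
        (c :: w).getD 7 ' ' = 'C') ∨ SpecP w := by
  constructor
  · rintro ⟨k, hk, h0, h2, h5, h6, h7⟩
    cases k with
    | zero => left; exact ⟨by simpa using hk, h0, h2, h5, h6, h7⟩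
    | succ k' =>
      right
      refine ⟨k', by simp at hk; omega, ?_, ?_, ?_, ?_, ?_⟩
      · simpa [getD_cons_add_one c w k' 0] using h0
      · simpa [getD_cons_add_one c w k' 2] using h2
      · simpa [getD_cons_add_one c w k' 5] using h5
      · rcases h6 with h6 | h6
        · left; simpa [getD_cons_add_one c w k' 6] using h6
        · right; simpa [getD_cons_add_one c w k' 6] using h6
      · simpa [getD_cons_add_one c w k' 7] using h7
  · rintro (⟨hl, h0, h2, h5, h6, h7⟩ | ⟨k, hk, h0, h2, h5, h6, h7⟩)
    · exact ⟨0, by simpa using hl, h0, h2, h5, h6, h7⟩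
    · refine ⟨k+1, by simp; omega, ?_, ?_, ?_, ?_, ?_⟩
      · simpa [getD_cons_add_one c w k 0] using h0
      · simpa [getD_cons_add_one c w k 2] using h2
      · simpa [getD_cons_add_one c w k 5] using h5
      · rcases h6 with h6 | h6
        · left; simpa [getD_cons_add_one c w k 6] using h6
        · right; simpa [getD_cons_add_one c w k 6] using h6
      · simpa [getD_cons_add_one c w k 7] using h7

lemma bAny_iff (v : List Char) : bAny v = true ↔ SpecP v := by
  induction v with
  | nil =>
    rw [bAny_short _ (by decide)]
    simp only [Bool.false_eq_true, false_iff]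
    exact specP_short [] (by decide)
  | cons c w IH =>
    by_cases hlong : 9 ≤ (c :: w).length
    · obtain ⟨c0,c1,c2,c3,c4,c5,c6,c7,c8,t,he⟩ := exists_nine (c :: w) hlong
      cases he
      rw [bAny_cons, specP_cons]
      simp only [Bool.or_eq_true, Bool.and_eq_true, beq_iff_eq]
      constructor
      · rintro (⟨⟨⟨⟨h0, h2⟩, h5⟩, h6⟩, h7⟩ | hb)
        · left
          refine ⟨by simp only [List.length_cons]; omega, by simpa using h0, by simpa using h2,
            by simpa using h5, by simpa using h6, by simpa using h7⟩
        · right; exact IH.mp hb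
      · rintro (⟨-, h0, h2, h5, h6, h7⟩ | hs)
        · left
          exact ⟨⟨⟨⟨by simpa using h0, by simpa using h2⟩, by simpa using h5⟩,
            by simpa using h6⟩, by simpa using h7⟩
        · right; exact IH.mpr hs
    · rw [bAny_short _ (by simp only [List.length_cons] at hlong ⊢; omega)]
      simp only [Bool.false_eq_true, false_iff]
      intro hs
      exact specP_short _ (by omega) hs

-- A's loop from index a equals bAny on the dropped uppercased list (reused structure)
lemma loop_eq (promoter : String) (v : List Char) :
    ∀ (a : Nat), (PySem.Chars.upper promoter.toList).drop a = v →
    skn7Loop promoter "G_C__GGCC" "G_C__GCCC"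
        (PySem.List.pyRange (a : Int) (PySem.Str.len promoter - PySem.Str.len "G_C__GGCC" + 1))
      = bAny v := by
  induction v with
  | nil =>
    intro a h
    have hn : (PySem.Chars.upper promoter.toList).length ≤ a := List.drop_eq_nil_iff.mp h
    have hlen : (PySem.Chars.upper promoter.toList).length = promoter.toList.length := by
      simp [PySem.Chars.upper]
    rw [PySem.List.pyRange_one_eq_nil (by
      have : PySem.Str.len promoter = (promoter.toList.length : Int) := by
        simp [PySem.Str.len_eq]
      rw [this]; have : PySem.Str.len "G_C__GGCC" = 9 := by decide
      rw [this]; omega)]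
    simp [skn7Loop, bAny]
  | cons c0 v' IH =>
    intro a h
    have hlen : (PySem.Chars.upper promoter.toList).length = promoter.toList.length := by
      simp [PySem.Chars.upper]
    have hdlen : (PySem.Chars.upper promoter.toList).length - a = v'.length + 1 := by
      have := congrArg List.length h
      simpa [List.length_drop] using this
    have ha : a < promoter.toList.length := by omega
    have h' : (PySem.Chars.upper promoter.toList).drop (a+1) = v' := by
      rw [← List.tail_drop, h]; rfl
    have hstr : PySem.Str.len promoter = (promoter.toList.length : Int) := by
      simp [PySem.Str.len_eq]
    have hm9 : PySem.Str.len "G_C__GGCC" = 9 := by decide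
    by_cases hlong : 8 ≤ v'.length
    · -- full window exists at a
      obtain ⟨c1,c2,c3,c4,c5,c6,c7,c8,t,rfl⟩ :
          ∃ c1 c2 c3 c4 c5 c6 c7 c8 t, v' = c1::c2::c3::c4::c5::c6::c7::c8::t := by
        obtain ⟨d0,d1,d2,d3,d4,d5,d6,d7,d8,t,he⟩ := exists_nine (c0 :: v') (by simp; omega)
        cases he
        exact ⟨d1,d2,d3,d4,d5,d6,d7,d8,t,rfl⟩
      have hstop : (a : Int) < PySem.Str.len promoter - PySem.Str.len "G_C__GGCC" + 1 := by
        rw [hstr, hm9]; omega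
      rw [PySem.List.pyRange_one_cons hstop]
      have hsample :
          (PySem.Str.upper (PySem.Str.slice promoter (some (a : Int))
              (some ((a : Int) + PySem.Str.len "G_C__GGCC")))).toList
            = [c0,c1,c2,c3,c4,c5,c6,c7,c8] := by
        rw [PySem.Str.toList_upper, PySem.Str.toList_slice, hm9]
        have : ((a : Int) + 9) = ((a : Int) + ((9:Nat) : Int)) := by norm_num
        rw [this]
        rw [show PySem.Chars.slice promoter.toList (some (a:Int)) (some ((a:Int) + ((9:Nat):Int)))
              = (promoter.toList.drop a).take 9 from PySem.List.slice_natCast_add _ a 9]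
        have : PySem.Chars.upper ((promoter.toList.drop a).take 9)
            = ((PySem.Chars.upper promoter.toList).drop a).take 9 := by
          simp [PySem.Chars.upper, List.map_take, List.map_drop]
        rw [this, h]
        rfl
      have hup1 : ((a : Int) + 1) = (((a+1 : Nat)) : Int) := by push_cast; ring
      simp only [skn7Loop]
      rw [hup1, IH (a+1) h', bAny_cons]
      set S := PySem.Str.upper (PySem.Str.slice promoter (some (a : Int))
          (some ((a : Int) + PySem.Str.len "G_C__GGCC"))) with hS
      have e0 : PySem.Str.pyGet? S 0 = some c0 := by
        simp [PySem.Str.pyGet?, hsample]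
      have e2 : PySem.Str.pyGet? S 2 = some c2 := by
        simp [PySem.Str.pyGet?, hsample]
      have eslice : (PySem.Str.slice S (some 5) (some 8)).toList = [c5,c6,c7] := by
        simp [PySem.Str.toList_slice, hsample, PySem.Chars.slice,
              PySem.List.slice_toNat _ (by norm_num : (0:Int) ≤ 5) (by norm_num : (0:Int) ≤ 8)]
      split_ifs with hp
      · -- A found the motif at this window: the B condition holds too
        obtain ⟨p0, p2, p5⟩ := hp
        rw [show PySem.Str.pyGet? "G_C__GGCC" 0 = some 'G' from by decide, e0] at p0
        rw [show PySem.Str.pyGet? "G_C__GGCC" 2 = some 'C' from by decide, e2] at p2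
        obtain rfl : c0 = 'G' := (Option.some_inj.mp p0).symm
        obtain rfl : c2 = 'C' := (Option.some_inj.mp p2).symm
        rcases p5 with p5 | p5
        · have : (['G','G','C'] : List Char) = [c5,c6,c7] := by
            rw [show (['G','G','C'] : List Char) = (PySem.Str.slice "G_C__GGCC" (some 5) (some 8)).toList from by decide,
               p5, eslice]
          obtain ⟨rfl, rfl, rfl⟩ : 'G' = c5 ∧ 'G' = c6 ∧ 'C' = c7 := by
            simpa using this
          simp
        · have : (['G','C','C'] : List Char) = [c5,c6,c7] := by
            rw [show (['G','C','C'] : List Char) = (PySem.Str.slice "G_C__GCCC" (some 5) (some 8)).toList from by decide,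
               p5, eslice]
          obtain ⟨rfl, rfl, rfl⟩ : 'G' = c5 ∧ 'C' = c6 ∧ 'C' = c7 := by
            simpa using this
          simp
      · -- A's condition fails here: the B condition is false as well
        suffices hb : ((c0 == 'G') && (c2 == 'C') && (c5 == 'G') && ((c6 == 'G') || (c6 == 'C')) && (c7 == 'C')) = false by
          rw [hb]; simp
        rcases Bool.eq_false_or_eq_true ((c0 == 'G') && (c2 == 'C') && (c5 == 'G') && ((c6 == 'G') || (c6 == 'C')) && (c7 == 'C')) with ht | hf
        · exfalso; apply hp
          simp only [Bool.and_eq_true, Bool.or_eq_true, beq_iff_eq] at ht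
          obtain ⟨⟨⟨⟨rfl, rfl⟩, rfl⟩, h6⟩, rfl⟩ := ht
          refine ⟨?_, ?_, ?_⟩
          · rw [show PySem.Str.pyGet? "G_C__GGCC" 0 = some 'G' from by decide, e0]
          · rw [show PySem.Str.pyGet? "G_C__GGCC" 2 = some 'C' from by decide, e2]
          · rcases h6 with rfl | rfl
            · left
              apply String.toList_inj.mp
              rw [eslice]; decide
            · right
              apply String.toList_inj.mp
              rw [eslice]; decide
        · exact hf
    · -- no full window: both sides false
      rw [PySem.List.pyRange_one_eq_nil (by rw [hstr, hm9]; omega)]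
      rw [bAny_short _ (by simp; omega)]
      rfl

-- membership in the filterMap index list as a statement about the character list
lemma mem_idxList (u : List Char) (ch : Char) (i : Int) :
    i ∈ (PySem.List.enumerate u).filterMap (fun x => if x.2 == ch then some x.1 else none)
      ↔ ∃ k : Nat, k < u.length ∧ i = (k : Int) ∧ u.getD k ' ' = ch := by
  rw [List.mem_filterMap]
  constructor
  · rintro ⟨⟨j, c⟩, hmem, hf⟩
    obtain ⟨k, hk, he⟩ := (PySem.List.mem_enumerate_iff u 0 (j, c)).mp hmem
    have hj : j = (k : Int) := by
      have := congrArg Prod.fst he; simpa using this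
    have hc : c = u[k] := congrArg Prod.snd he
    subst hj hc
    by_cases hceq : u[k] == ch
    · refine ⟨k, hk, ?_, ?_⟩
      · simp [hceq] at hf; omega
      · rw [List.getD_eq_getElem u ' ' hk]; exact beq_iff_eq.mp hceq
    · simp [hceq] at hf
  · rintro ⟨k, hk, rfl, hch⟩
    refine ⟨((k : Int), u[k]), ?_, ?_⟩
    · exact (PySem.List.mem_enumerate_iff u 0 _).mpr ⟨k, hk, by simp⟩
    · rw [List.getD_eq_getElem u ' ' hk] at hch
      simp [hch]

lemma alt_iff (promoter : String) :
    skn7_Test_alt promoter = true ↔ SpecP (PySem.Chars.upper promoter.toList) := by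
  have hup : (PySem.Str.upper promoter).toList = PySem.Chars.upper promoter.toList := by simp
  have hlen : PySem.Str.len (PySem.Str.upper promoter)
      = ((PySem.Chars.upper promoter.toList).length : Int) := by
    rw [PySem.Str.len_eq, hup]
  set u := PySem.Chars.upper promoter.toList with hu
  unfold skn7_Test_alt
  simp only [hup, hlen, PySem.Set.len, decide_eq_true_eq, Int.natCast_pos,
    List.length_pos_iff_exists_mem]
  constructor
  · rintro ⟨x, hx⟩
    simp only [PySem.Set.mem_inter, PySem.Set.mem_ofList, PySem.Set.mem_union,
      List.mem_filter, List.mem_map, mem_idxList, decide_eq_true_eq] at hx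
    obtain ⟨h1234, h7⟩ := hx
    obtain ⟨h123, h6⟩ := h1234
    obtain ⟨h12, h5⟩ := h123
    obtain ⟨h1, h2⟩ := h12
    obtain ⟨hG, hle⟩ := h1
    obtain ⟨k0, hk0, hx0, hG0⟩ := hG
    subst hx0
    obtain ⟨y2, ⟨k2, hk2, hy2, hC2⟩, he2⟩ := h2
    obtain ⟨y5, ⟨k5, hk5, hy5, hG5⟩, he5⟩ := h5
    obtain ⟨y7, ⟨k7, hk7, hy7, hC7⟩, he7⟩ := h7
    subst hy2; subst hy5; subst hy7
    refine ⟨k0, by omega, hG0, ?_, ?_, ?_, ?_⟩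
    · have : k2 = k0 + 2 := by omega
      subst this; exact hC2
    · have : k5 = k0 + 5 := by omega
      subst this; exact hG5
    · obtain ⟨y6, h6m, he6⟩ := h6
      rcases h6m with ⟨k6, hk6, hy6, hG6⟩ | ⟨k6, hk6, hy6, hC6⟩ <;> subst hy6
      · left; have : k6 = k0 + 6 := by omega
        subst this; exact hG6
      · right; have : k6 = k0 + 6 := by omega
        subst this; exact hC6
    · have : k7 = k0 + 7 := by omega
      subst this; exact hC7
  · rintro ⟨k, h9, h0, h2, h5, h6, h7⟩
    refine ⟨(k : Int), ?_⟩
    simp only [PySem.Set.mem_inter, PySem.Set.mem_ofList, PySem.Set.mem_union,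
      List.mem_filter, List.mem_map, mem_idxList, decide_eq_true_eq]
    refine ⟨⟨⟨⟨⟨⟨k, by omega, rfl, h0⟩, by omega⟩,
      ⟨((k : Int) + 2), ⟨k + 2, by omega, by push_cast; ring, h2⟩, by ring⟩⟩,
      ⟨((k : Int) + 5), ⟨k + 5, by omega, by push_cast; ring, h5⟩, by ring⟩⟩,
      ⟨((k : Int) + 6), ?_, by ring⟩⟩,
      ⟨((k : Int) + 7), ⟨k + 7, by omega, by push_cast; ring, h7⟩, by ring⟩⟩
    rcases h6 with h6 | h6
    · exact Or.inl ⟨k + 6, by omega, by push_cast; ring, h6⟩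
    · exact Or.inr ⟨k + 6, by omega, by push_cast; ring, h6⟩

-- ===== VERDICT (by name: the statement is the Claim_ definition above) =====
theorem skn7_Test_spec : Claim_equal_skn7_Test := by
  intro promoter _
  unfold Spec_skn7_Test
  have hA : skn7_Test promoter = bAny (PySem.Chars.upper promoter.toList) := by
    show skn7Loop promoter "G_C__GGCC" "G_C__GCCC"
        (PySem.List.pyRange 0 (PySem.Str.len promoter - PySem.Str.len "G_C__GGCC" + 1))
      = bAny (PySem.Chars.upper promoter.toList)
    have := loop_eq promoter (PySem.Chars.upper promoter.toList) 0 (by simp)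
    simpa using this
  have hiff : skn7_Test promoter = true ↔ skn7_Test_alt promoter = true := by
    rw [hA, bAny_iff, alt_iff]
  cases hB : skn7_Test_alt promoter
  · cases hA' : skn7_Test promoter
    · rfl
    · exact absurd (hiff.mp hA') (by simp [hB])
  · exact hiff.mpr hB
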